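-- pv_equiv track=rewrite | github.com/1282saa/ringring-da | analysis/07_scripts/deep_analysis.py | classify_service
-- ===== SOURCE A (Python) =====
-- SERVICE_TYPES = {
--     'AI_BASED': ['cake', 'santa', 'maxai'],       # AI 기반 서비스
--     'HUMAN_TUTOR': ['ringle', 'uphone', 'carrot', 'pagoda'],  # 휴먼 튜터 서비스
--     'CONTENT_BASED': ['yanadu', 'hackers', 'malhae']  # 콘텐츠/강의 기반
-- }
--
-- PRICE_TIER = {
--     'PREMIUM': ['ringle'],        # 고가 (40분 3-5만원)
--     'MID': ['uphone', 'carrot', 'pagoda', 'yanadu', 'hackers'],  # 중가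
--     'LOW': ['cake', 'santa', 'maxai', 'malhae']  # 저가/무료+프리미엄
-- }
--
-- LEARNING_MODE = {
--     'SYNCHRONOUS': ['ringle', 'uphone', 'carrot', 'pagoda'],  # 실시간 대화
--     'ASYNCHRONOUS': ['cake', 'santa', 'yanadu', 'hackers', 'malhae', 'maxai']  # 비실시간
-- }
--
-- def classify_service(company):
--     """서비스 유형 분류"""
--     result = {'company': company}
--     for type_name, companies in SERVICE_TYPES.items():
--         if company.lower() in companies:
--             result['service_type'] = type_name
--     for tier, companies in PRICE_TIER.items():
--         if company.lower() in companies: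
--             result['price_tier'] = tier
--     for mode, companies in LEARNING_MODE.items():
--         if company.lower() in companies:
--             result['learning_mode'] = mode
--     return result
-- ===== SOURCE B (Python) =====
-- SERVICE_TYPES = {
--     'AI_BASED': ['cake', 'santa', 'maxai'],
--     'HUMAN_TUTOR': ['ringle', 'uphone', 'carrot', 'pagoda'],
--     'CONTENT_BASED': ['yanadu', 'hackers', 'malhae']
-- }
--
-- PRICE_TIER = {
--     'PREMIUM': ['ringle'],
--     'MID': ['uphone', 'carrot', 'pagoda', 'yanadu', 'hackers'],
--     'LOW': ['cake', 'santa', 'maxai', 'malhae']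
-- }
--
-- LEARNING_MODE = {
--     'SYNCHRONOUS': ['ringle', 'uphone', 'carrot', 'pagoda'],
--     'ASYNCHRONOUS': ['cake', 'santa', 'yanadu', 'hackers', 'malhae', 'maxai']
-- }
--
-- # Inverted indexes, built once: company name -> its category.
-- SERVICE_OF = {c: t for t, cs in SERVICE_TYPES.items() for c in cs}
-- TIER_OF = {c: t for t, cs in PRICE_TIER.items() for c in cs}
-- MODE_OF = {c: m for m, cs in LEARNING_MODE.items() for c in cs}
--
--
-- def classify_service(company):
--     """서비스 유형 분류"""
--     result = {'company': company}
--     key = company.lower()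
--     if key in SERVICE_OF:
--         result['service_type'] = SERVICE_OF[key]
--     if key in TIER_OF:
--         result['price_tier'] = TIER_OF[key]
--     if key in MODE_OF:
--         result['learning_mode'] = MODE_OF[key]
--     return result
-- ===== Notes on version B (the rewrite author's own statement) =====
-- stated objective: idiomatic
-- what changed: Replaces the three scanning loops over the category tables by three precomputed inverted dictionaries (name -> category) consulted with a single membership-guarded lookup each, computing company.lower() once.
import Mathlib
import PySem

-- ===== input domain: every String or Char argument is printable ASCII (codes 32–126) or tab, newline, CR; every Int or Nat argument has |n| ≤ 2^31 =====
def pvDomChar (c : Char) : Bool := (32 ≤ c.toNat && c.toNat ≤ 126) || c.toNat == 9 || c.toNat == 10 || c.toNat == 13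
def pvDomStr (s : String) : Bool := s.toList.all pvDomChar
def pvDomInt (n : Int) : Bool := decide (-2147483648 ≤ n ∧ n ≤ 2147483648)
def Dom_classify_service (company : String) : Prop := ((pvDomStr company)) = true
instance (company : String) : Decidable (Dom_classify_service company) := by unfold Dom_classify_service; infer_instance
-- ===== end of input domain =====

-- B replaces A's three table scans by precomputed inverted dictionaries with one guarded lookup each (objective: idiomatic).

-- ===== PORT A =====
def pvSERVICE_TYPES : List (String × List String) :=
  [("AI_BASED", ["cake", "santa", "maxai"]),
   ("HUMAN_TUTOR", ["ringle", "uphone", "carrot", "pagoda"]),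
   ("CONTENT_BASED", ["yanadu", "hackers", "malhae"])]

def pvPRICE_TIER : List (String × List String) :=
  [("PREMIUM", ["ringle"]),
   ("MID", ["uphone", "carrot", "pagoda", "yanadu", "hackers"]),
   ("LOW", ["cake", "santa", "maxai", "malhae"])]

def pvLEARNING_MODE : List (String × List String) :=
  [("SYNCHRONOUS", ["ringle", "uphone", "carrot", "pagoda"]),
   ("ASYNCHRONOUS", ["cake", "santa", "yanadu", "hackers", "malhae", "maxai"])]

def classify_service (company : String) : List (String × String) :=
  let result : PySem.Dict String String := PySem.Dict.ofList [("company", company)]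
  let result := pvSERVICE_TYPES.foldl
    (fun r p => if PySem.Str.lower company ∈ p.2 then r.insert "service_type" p.1 else r) result
  let result := pvPRICE_TIER.foldl
    (fun r p => if PySem.Str.lower company ∈ p.2 then r.insert "price_tier" p.1 else r) result
  let result := pvLEARNING_MODE.foldl
    (fun r p => if PySem.Str.lower company ∈ p.2 then r.insert "learning_mode" p.1 else r) result
  result.items

-- ===== PORT B =====
-- inverted dictionaries, built once from the tables (dict comprehension in Source B)
def pvSERVICE_OF : PySem.Dict String String :=
  PySem.Dict.ofList (pvSERVICE_TYPES.flatMap (fun p => p.2.map (fun c => (c, p.1))))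
def pvTIER_OF : PySem.Dict String String :=
  PySem.Dict.ofList (pvPRICE_TIER.flatMap (fun p => p.2.map (fun c => (c, p.1))))
def pvMODE_OF : PySem.Dict String String :=
  PySem.Dict.ofList (pvLEARNING_MODE.flatMap (fun p => p.2.map (fun c => (c, p.1))))

def classify_service_alt (company : String) : List (String × String) :=
  let key := PySem.Str.lower company
  let result : PySem.Dict String String := PySem.Dict.ofList [("company", company)]
  let result := match pvSERVICE_OF.get? key with
    | some v => result.insert "service_type" v
    | none => result
  let result := match pvTIER_OF.get? key with
    | some v => result.insert "price_tier" v
    | none => result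
  let result := match pvMODE_OF.get? key with
    | some v => result.insert "learning_mode" v
    | none => result
  result.items

-- ===== PRECONDITION & SPEC =====
def Spec_classify_service (company : String) (out : List (String × String)) : Prop := out = classify_service_alt company
instance (company : String) (out : List (String × String)) : Decidable (Spec_classify_service company out) := by unfold Spec_classify_service; infer_instance

-- ===== CLAIM (what is proved, stated in full; the proofs are below) =====
def Claim_equal_classify_service : Prop := ∀ (company : String), Dom_classify_service company → Spec_classify_service company (classify_service company)

-- ===== LEMMAS AND PROOFS =====
-- The catch-all case of the proof: the lowered name matches no table entry, so both sides keep only ("company", c).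

-- ===== VERDICT (by name: the statement is the Claim_ definition above) =====
theorem classify_service_spec : Claim_equal_classify_service := by
  intro c _
  show classify_service c = classify_service_alt c
  unfold classify_service classify_service_alt
  generalize PySem.Str.lower c = k
  by_cases h1 : k = "cake"
  · subst h1; rfl
  by_cases h2 : k = "santa"
  · subst h2; rfl
  by_cases h3 : k = "maxai"
  · subst h3; rfl
  by_cases h4 : k = "ringle"
  · subst h4; rfl
  by_cases h5 : k = "uphone"
  · subst h5; rfl
  by_cases h6 : k = "carrot"
  · subst h6; rfl
  by_cases h7 : k = "pagoda"
  · subst h7; rfl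
  by_cases h8 : k = "yanadu"
  · subst h8; rfl
  by_cases h9 : k = "hackers"
  · subst h9; rfl
  by_cases h10 : k = "malhae"
  · subst h10; rfl
  simp [pvSERVICE_TYPES, pvPRICE_TIER, pvLEARNING_MODE, pvSERVICE_OF, pvTIER_OF, pvMODE_OF,
    PySem.Dict.ofList, PySem.Dict.update, PySem.Dict.insert, PySem.Dict.contains, PySem.Dict.empty,
    List.foldl, List.flatMap, List.map, PySem.Dict.get?, beq_iff_eq,
    h1, h2, h3, h4, h5, h6, h7, h8, h9, h10,
    Ne.symm h1, Ne.symm h2, Ne.symm h3, Ne.symm h4, Ne.symm h5,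
    Ne.symm h6, Ne.symm h7, Ne.symm h8, Ne.symm h9, Ne.symm h10]
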